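-- pv_equiv track=rewrite | github.com/aligliska/CS-313e | Boxes.py | largest_nesting_subsets
-- ===== SOURCE A (Python) =====
-- def does_fit (box1, box2):
--   '''
--   Returns a boolean for whether box 1 fits in box 2
--   '''
--   return (box1[0] < box2[0] and box1[1] < box2[1] and box1[2] < box2[2])
--
-- def largest_nesting_subsets (all_box_subsets):
--   '''
--   Returns length of largest nesting boxes and frequency of that size
--   '''
--   nested_boxes = []
--
--   # finds all subsets where boxes are nested
--   for box in all_box_subsets:
--     if len(box) != 0:
--       curr, next = 0, 1
--       curr_subsets = [box[curr]]
--       is_nesting_boxes(curr, next, box, curr_subsets, nested_boxes)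
--
--   # finds the largest size of subset[s]
--   nested_boxes.sort(key = len, reverse = True)
--   largest_subsets = len(nested_boxes[0])
--
--   # finds the occurance of the largest subset size
--   count = 0
--   for i in range(len(nested_boxes)-1, -1, -1):
--     if len(nested_boxes[i]) == largest_subsets:
--       count += 1
--
--   return largest_subsets, count
--
-- def is_nesting_boxes(curr, next, box, curr_subsets, nested_boxes):
--   '''
--   Compares if current box can nest into following boxes through recursion
--   '''
--   # base case if next is out of index
--   if next >= len(box):
--     # adds the current subset into total subset list
--     if curr_subsets not in nested_boxes:
--       nested_boxes.append(curr_subsets)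
--
--   else:
--     # current box fits into the next box
--     if does_fit(box[curr], box[next]):
--       curr = next
--       curr_subsets.append(box[curr])
--       # checks if next box fits into the following box (through recursion)
--       is_nesting_boxes(curr, next + 1, box, curr_subsets, nested_boxes)
--     # curent box does not fit into next box, try with following box
--     else:
--       is_nesting_boxes(curr, next + 1, box, curr_subsets, nested_boxes)
-- ===== SOURCE B (Python) =====
-- def does_fit(box1, box2):
--     return box1[0] < box2[0] and box1[1] < box2[1] and box1[2] < box2[2]
--
-- def largest_nesting_subsets(all_box_subsets):
--     chains = []
--     for box in all_box_subsets:
--         if box: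
--             current = box[0]
--             chain = [current]
--             for nxt in box[1:]:
--                 if does_fit(current, nxt):
--                     chain.append(nxt)
--                     current = nxt
--             if chain not in chains:
--                 chains.append(chain)
--     best = max(len(c) for c in chains)
--     count = sum(1 for c in chains if len(c) == best)
--     return best, count
-- ===== Notes on version B (the rewrite author's own statement) =====
-- stated objective: simpler
-- what changed: The recursive is_nesting_boxes helper (index pair, mutation of shared lists) is replaced by a plain forward loop building each greedy chain, and the sort-descending-then-backward-count tail is replaced by max over the chain lengths plus a one-pass count.
import Mathlib
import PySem

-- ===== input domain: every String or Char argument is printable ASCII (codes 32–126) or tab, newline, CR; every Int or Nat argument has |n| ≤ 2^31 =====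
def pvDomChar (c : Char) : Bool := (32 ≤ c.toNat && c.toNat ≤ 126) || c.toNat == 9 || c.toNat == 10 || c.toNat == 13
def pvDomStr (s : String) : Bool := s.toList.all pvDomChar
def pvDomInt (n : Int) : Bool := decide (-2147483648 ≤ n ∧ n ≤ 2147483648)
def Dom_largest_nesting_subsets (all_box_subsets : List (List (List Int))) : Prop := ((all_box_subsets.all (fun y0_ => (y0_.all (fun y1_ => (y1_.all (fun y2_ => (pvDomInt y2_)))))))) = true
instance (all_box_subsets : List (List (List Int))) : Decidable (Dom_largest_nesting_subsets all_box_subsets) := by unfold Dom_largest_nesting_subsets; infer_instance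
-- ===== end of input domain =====

-- ===== PORT A =====
-- B changes the decomposition: an explicit greedy loop per sublist instead of the index
-- recursion, and a single max/count pass instead of sort-descending + backward count.

-- does_fit: exact on Pre_ (every index does_fit actually reads is in range there, so getD
-- is Python's indexing on every comparison A performs)
def doesFit (box1 box2 : List Int) : Bool :=
  decide (box1.getD 0 0 < box2.getD 0 0) && decide (box1.getD 1 0 < box2.getD 1 0) &&
    decide (box1.getD 2 0 < box2.getD 2 0)

-- is_nesting_boxes: recursion on `next`; box[curr]/box[next] via getD (indices are
-- nonnegative and in range whenever read, so getD is Python's indexing)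
def isNestingBoxes (curr next : Nat) (box : List (List Int)) (currSubsets : List (List Int))
    (nestedBoxes : List (List (List Int))) : List (List (List Int)) :=
  if h : next ≥ box.length then
    if nestedBoxes.contains currSubsets then nestedBoxes else nestedBoxes ++ [currSubsets]
  else
    if doesFit (box.getD curr []) (box.getD next []) then
      isNestingBoxes next (next + 1) box (currSubsets ++ [box.getD next []]) nestedBoxes
    else
      isNestingBoxes curr (next + 1) box currSubsets nestedBoxes
termination_by box.length - next
decreasing_by all_goals omega

def largest_nesting_subsets (all_box_subsets : List (List (List Int))) : Int × Int :=
  let nestedBoxes := all_box_subsets.foldl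
    (fun nestedBoxes box =>
      if box.length ≠ 0 then isNestingBoxes 0 1 box [box.getD 0 []] nestedBoxes
      else nestedBoxes) []
  let sortedBoxes := PySem.List.sorted nestedBoxes (fun c => (c.length : Int)) true
  -- nested_boxes[0]: raises IndexError when empty; Pre_ guarantees nonempty
  let largest : Int := ((PySem.List.pyGetD sortedBoxes 0 []).length : Int)
  let count : Int := (PySem.List.pyRange ((sortedBoxes.length : Int) - 1) (-1) (-1)).foldl
    (fun acc i =>
      if ((PySem.List.pyGetD sortedBoxes i []).length : Int) == largest then acc + 1 else acc) 0
  (largest, count)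

-- ===== PORT B =====
def largest_nesting_subsets_alt (all_box_subsets : List (List (List Int))) : Int × Int :=
  let chains := all_box_subsets.foldl
    (fun chains box =>
      match box with
      | [] => chains
      | b0 :: rest =>
        let chain := (rest.foldl
          (fun st nxt => if doesFit st.2 nxt then (st.1 ++ [nxt], nxt) else st)
          ([b0], b0)).1
        if chains.contains chain then chains else chains ++ [chain]) []
  -- max(...): raises ValueError on an empty generator; Pre_ guarantees chains ≠ []
  let best := (PySem.List.max? (chains.map (fun c => (c.length : Int))) (fun x => x)).getD 0
  (best, ((chains.map (fun c => (c.length : Int))).count best : Int))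

-- ===== PRECONDITION & SPEC =====
-- cmpSafe c n: the single Python comparison does_fit(c, n) completes without IndexError —
-- every coordinate it reads (under `and` short-circuiting) exists; closed form over lengths
-- and the compared values only
def cmpSafe (c n : List Int) : Bool :=
  decide (1 ≤ c.length) && decide (1 ≤ n.length) &&
    (!decide (c.getD 0 0 < n.getD 0 0) ||
      (decide (2 ≤ c.length) && decide (2 ≤ n.length) &&
        (!decide (c.getD 1 0 < n.getD 1 0) ||
          (decide (3 ≤ c.length) && decide (3 ≤ n.length)))))

-- nesting test used only to state which comparisons are performed (index-safe by cmpSafe)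
def nestsInto (c n : List Int) : Bool :=
  decide (c.getD 0 0 < n.getD 0 0) && decide (c.getD 1 0 < n.getD 1 0) &&
    decide (c.getD 2 0 < n.getD 2 0)

-- chainSafe c t: every does_fit comparison performed on this sublist (current greedy
-- element against each following box) is index-safe; it tracks only index-safety of the
-- comparisons, never the computed result
def chainSafe (c : List Int) (t : List (List Int)) : Bool :=
  match t with
  | [] => true
  | n :: rest => cmpSafe c n && (if nestsInto c n then chainSafe n rest else chainSafe c rest)

-- Pre_ excludes EXACTLY the inputs on which the Python A raises: those whose sublists are
-- all empty (IndexError at nested_boxes[0]; B's max(...) raises ValueError there too) and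
-- those where some does_fit comparison reads a coordinate of a box shorter than it
-- inspects (IndexError; Python B performs the identical comparisons and raises there too).
def Pre_largest_nesting_subsets (all_box_subsets : List (List (List Int))) : Prop :=
  (∃ b ∈ all_box_subsets, b ≠ []) ∧
    ∀ s ∈ all_box_subsets, chainSafe (s.headD []) s.tail = true
instance (all_box_subsets : List (List (List Int))) : Decidable (Pre_largest_nesting_subsets all_box_subsets) := by unfold Pre_largest_nesting_subsets; infer_instance

def pvWitness_largest_nesting_subsets : List (List (List Int)) :=
  [[[1, 1, 1], [2, 2, 2], [0, 0, 0]], [], [[3, 3, 3]]]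

def Spec_largest_nesting_subsets (all_box_subsets : List (List (List Int))) (out : Int × Int) : Prop := out = largest_nesting_subsets_alt all_box_subsets
instance (all_box_subsets : List (List (List Int))) (out : Int × Int) : Decidable (Spec_largest_nesting_subsets all_box_subsets out) := by unfold Spec_largest_nesting_subsets; infer_instance

-- ===== CLAIM (what is proved, stated in full; the proofs are below) =====
def Claim_equal_largest_nesting_subsets : Prop := ∀ (all_box_subsets : List (List (List Int))), Dom_largest_nesting_subsets all_box_subsets → Pre_largest_nesting_subsets all_box_subsets → Spec_largest_nesting_subsets all_box_subsets (largest_nesting_subsets all_box_subsets)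

-- ===== LEMMAS AND PROOFS =====
-- B's greedy step over the remaining boxes
def chainStep (st : List (List Int) × List Int) (nxt : List Int) : List (List Int) × List Int :=
  if doesFit st.2 nxt then (st.1 ++ [nxt], nxt) else st

-- A's recursion computes exactly: fold B's greedy step over box[next:], then append if new.
lemma isNesting_eq_fold (box : List (List Int)) :
    ∀ (k next curr : Nat) (acc : List (List Int)) (nested : List (List (List Int))),
      box.length - next ≤ k →
      isNestingBoxes curr next box acc nested =
        (if nested.contains ((box.drop next).foldl chainStep (acc, box.getD curr [])).1
         then nested
         else nested ++ [((box.drop next).foldl chainStep (acc, box.getD curr [])).1]) := by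
  intro k
  induction k with
  | zero =>
    intro next curr acc nested hk
    rw [isNestingBoxes]
    have h : next ≥ box.length := by omega
    rw [dif_pos h, List.drop_eq_nil_of_le h]
    simp only [List.foldl_nil]
  | succ k ih =>
    intro next curr acc nested hk
    rw [isNestingBoxes]
    by_cases h : next ≥ box.length
    · rw [dif_pos h, List.drop_eq_nil_of_le h]
      simp only [List.foldl_nil]
    · have hlt : next < box.length := by omega
      have hdrop : box.drop next = box.getD next [] :: box.drop (next + 1) := by
        rw [List.drop_eq_getElem_cons hlt, List.getD_eq_getElem box [] hlt]
      simp only [h, dite_false]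
      by_cases hfit : doesFit (box.getD curr []) (box.getD next []) = true
      · rw [if_pos hfit, ih _ _ _ _ (by omega), hdrop]
        simp only [List.foldl_cons, chainStep, hfit, if_true]
      · rw [if_neg hfit, ih _ _ _ _ (by omega), hdrop]
        simp only [List.foldl_cons, chainStep, eq_false hfit, if_false]

-- the two per-sublist steps agree, hence the two accumulations build the same list
lemma nested_eq_chains (all_box_subsets : List (List (List Int))) :
    all_box_subsets.foldl
      (fun nestedBoxes box =>
        if box.length ≠ 0 then isNestingBoxes 0 1 box [box.getD 0 []] nestedBoxes
        else nestedBoxes) [] =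
    all_box_subsets.foldl
      (fun chains box =>
        match box with
        | [] => chains
        | b0 :: rest =>
          let chain := (rest.foldl
            (fun st nxt => if doesFit st.2 nxt then (st.1 ++ [nxt], nxt) else st)
            ([b0], b0)).1
          if chains.contains chain then chains else chains ++ [chain]) [] := by
  congr 1
  funext nested box
  cases box with
  | nil => simp
  | cons b0 rest =>
    have := isNesting_eq_fold (b0 :: rest) (rest.length + 1) 1 0 [b0] nested
    simp only [List.length_cons, List.drop_one, List.tail_cons, List.getD_cons_zero] at this
    rw [if_pos (by simp), List.getD_cons_zero, this (by omega)]
    rfl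

-- the accumulated list is nonempty once some sublist is nonempty
lemma chains_ne_nil (all_box_subsets : List (List (List Int))) :
    ∀ (acc : List (List (List Int))),
      (acc ≠ [] ∨ ∃ b ∈ all_box_subsets, b ≠ []) →
      all_box_subsets.foldl
        (fun chains box =>
          match box with
          | [] => chains
          | b0 :: rest =>
            let chain := (rest.foldl
              (fun st nxt => if doesFit st.2 nxt then (st.1 ++ [nxt], nxt) else st)
              ([b0], b0)).1
            if chains.contains chain then chains else chains ++ [chain]) acc ≠ [] := by
  induction all_box_subsets with
  | nil => intro acc h; simpa using h
  | cons b bs ih =>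
    intro acc h
    cases b with
    | nil =>
      simp only [List.foldl_cons]
      refine ih acc ?_
      rcases h with h | ⟨c, hc, hne⟩
      · exact Or.inl h
      · rcases List.mem_cons.mp hc with hc | hc
        · exact absurd hc hne
        · exact Or.inr ⟨c, hc, hne⟩
    | cons b0 rest =>
      simp only [List.foldl_cons]
      apply ih
      left
      split
      · next hmem => exact fun hnil => by rw [hnil] at hmem; simp at hmem
      · simp

-- A's count loop over range(len(S)-1, -1, -1) is the count of the extremal length over S
lemma countA_eq (S : List (List (List Int))) (v : Int) :
    (PySem.List.pyRange ((S.length : Int) - 1) (-1) (-1)).foldl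
      (fun acc i => if ((PySem.List.pyGetD S i []).length : Int) == v then acc + 1 else acc) 0
      = (S.countP (fun c => (c.length : Int) == v) : Int) := by
  rw [PySem.List.foldl_if_add_one, zero_add]
  have h1 : PySem.List.pyRange ((S.length : Int) - 1) (-1) (-1)
      = (PySem.List.pyRange 0 (S.length : Int) 1).reverse := by
    have h := PySem.List.pyRange_neg_one_eq_reverse ((S.length : Int) - 1) (-1)
    simpa using h
  rw [h1, List.countP_reverse]
  have h2 : S.countP (fun c => (c.length : Int) == v)
      = (PySem.List.pyRange 0 (S.length : Int) 1).countP
          (fun i => ((PySem.List.pyGetD S i []).length : Int) == v) := by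
    conv_lhs => rw [← PySem.List.map_pyGetD_pyRange_zero' S ([] : List (List Int))]
    rw [List.countP_map]
    rfl
  rw [h2]

-- ===== VERDICT (by name: the statement is the Claim_ definition above) =====
theorem largest_nesting_subsets_spec : Claim_equal_largest_nesting_subsets := by
  intro all hdom hpre
  unfold Spec_largest_nesting_subsets largest_nesting_subsets largest_nesting_subsets_alt
  rw [nested_eq_chains]
  set L := all.foldl
    (fun chains box =>
      match box with
      | [] => chains
      | b0 :: rest =>
        let chain := (rest.foldl
          (fun st nxt => if doesFit st.2 nxt then (st.1 ++ [nxt], nxt) else st)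
          ([b0], b0)).1
        if chains.contains chain then chains else chains ++ [chain]) [] with hL
  have hLne : L ≠ [] := chains_ne_nil all [] (Or.inr hpre.1)
  dsimp only
  have hSne : PySem.List.sorted L (fun c => (c.length : Int)) true ≠ [] := by
    rw [Ne, PySem.List.sorted_eq_nil_iff]; exact hLne
  obtain ⟨m, t, hS⟩ := List.exists_cons_of_ne_nil hSne
  obtain ⟨b, hb⟩ : ∃ b, PySem.List.max? (L.map fun c => (c.length : Int)) (fun x => x) = some b := by
    cases hmm : PySem.List.max? (L.map fun c => (c.length : Int)) (fun x => x) with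
    | none => exact absurd ((PySem.List.max?_eq_none_iff _ _).mp hmm) (by simpa using hLne)
    | some b => exact ⟨b, rfl⟩
  have hmL : m ∈ L := by
    have hm : m ∈ PySem.List.sorted L (fun c => (c.length : Int)) true := by
      rw [hS]; exact List.mem_cons_self ..
    exact (PySem.List.mem_sorted _ _ _ _).mp hm
  have hble : b ≤ (m.length : Int) := by
    obtain ⟨y, hy, hyb⟩ := List.mem_map.mp (PySem.List.max?_mem hb)
    rw [← hyb]
    exact PySem.List.key_head_sorted_rev_ge L (fun c => (c.length : Int)) hS y hy
  have hgeb : (m.length : Int) ≤ b :=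
    PySem.List.max?_isMax hb _ (List.mem_map_of_mem hmL)
  have hbm : b = (m.length : Int) := le_antisymm hble hgeb
  have hp : (m :: t).Perm L := hS ▸ PySem.List.sorted_perm L (fun c => (c.length : Int)) true
  rw [hS, hb, countA_eq, PySem.List.pyGetD_zero_cons, Option.getD_some, hbm,
    List.count_eq_countP, List.countP_map]
  refine Prod.ext rfl ?_
  simp only [Int.natCast_inj]
  exact hp.countP_eq _
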